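-- pv_equiv track=rewrite | github.com/hyungun0/pytextlib | pytextlib/formatter.py | generate_initials
-- ===== SOURCE A (Python) =====
-- def generate_initials(input_string: str) -> str:
--     """
--     Generates initials from a given name or phrase.
--
--     It splits the input string by spaces, takes the first boundary_character of each part,
--     and returns them joined together as an uppercase string.
--
--     Args:
--         input_string: The string to generate initials from (e.g., a full name).
--
--     Returns:
--         A string containing the initials, or an empty string if the input is empty.
--
--     Raises:
--         TypeError: If the input is not a string.
--     """
--     # --- Input Validation ---
--     if not isinstance(input_string, str):
--         raise TypeError("Input 'input_string' must be a string.")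
--
--     if not input_string.strip():
--         return ""
--
--     # --- Core Logic ---
--     word_list = input_string.split()
--
--     initials_list = []
--     for word in word_list:
--         if word[0].isalnum():
--             initials_list.append(word[0])
--
--     return "".join(initials_list).upper()
-- ===== SOURCE B (Python) =====
-- def generate_initials(input_string: str) -> str:
--     if not isinstance(input_string, str):
--         raise TypeError("Input 'input_string' must be a string.")
--     chars = []
--     at_word_start = True
--     for ch in input_string:
--         if ch.isspace():
--             at_word_start = True
--         else:
--             if at_word_start and ch.isalnum():
--                 chars.append(ch.upper())
--             at_word_start = False
--     return "".join(chars)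
-- ===== Notes on version B (the rewrite author's own statement) =====
-- stated objective: simpler
-- what changed: Replaces split()+word-list+word[0] indexing by a single character scan that tracks a word-boundary flag and uppercases initials as it collects them.
import Mathlib
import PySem

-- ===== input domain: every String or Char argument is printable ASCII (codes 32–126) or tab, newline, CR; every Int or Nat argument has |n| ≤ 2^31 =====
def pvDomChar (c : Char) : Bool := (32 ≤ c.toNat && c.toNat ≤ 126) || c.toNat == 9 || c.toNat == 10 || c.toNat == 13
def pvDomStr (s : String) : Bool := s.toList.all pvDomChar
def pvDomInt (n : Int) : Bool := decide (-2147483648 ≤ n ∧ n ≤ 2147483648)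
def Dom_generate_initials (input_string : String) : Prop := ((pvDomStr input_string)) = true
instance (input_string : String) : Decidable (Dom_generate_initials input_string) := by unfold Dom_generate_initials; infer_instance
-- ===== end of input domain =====

-- B replaces split()+word[0] indexing by one character scan with a word-boundary flag (simpler decomposition, same cost).

-- ===== PORT A =====
-- loop body of A's for-loop over the word list ('[] => acc' is Python's unreachable case: split() yields no empty word)
def pvAStep (acc : List Char) (word : List Char) : List Char :=
  match word with
  | [] => acc
  | c :: _ => if PySem.Chars.isalnum c then acc ++ [c] else acc

def generate_initials (input_string : String) : String :=
  if PySem.Str.strip input_string = "" then ""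
  else
    let word_list := PySem.Chars.split₀ input_string.toList
    let initials_list := word_list.foldl pvAStep ([] : List Char)
    String.mk (PySem.Chars.upper initials_list)

-- ===== PORT B =====
-- loop body of B's for-loop over the characters; state = (collected chars, at_word_start)
def pvBStep (st : List Char × Bool) (ch : Char) : List Char × Bool :=
  if PySem.Chars.isspace ch then (st.1, true)
  else ((if st.2 && PySem.Chars.isalnum ch then st.1 ++ [PySem.Chars.upperChar ch] else st.1), false)

def generate_initials_alt (input_string : String) : String :=
  let st := input_string.toList.foldl pvBStep (([] : List Char), true)
  String.mk st.1

-- ===== PRECONDITION & SPEC =====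
def Spec_generate_initials (input_string : String) (out : String) : Prop := out = generate_initials_alt input_string
instance (input_string : String) (out : String) : Decidable (Spec_generate_initials input_string out) := by unfold Spec_generate_initials; infer_instance

-- ===== CLAIM (what is proved, stated in full; the proofs are below) =====
def Claim_equal_generate_initials : Prop := ∀ (input_string : String), Dom_generate_initials input_string → Spec_generate_initials input_string (generate_initials input_string)

-- ===== LEMMAS AND PROOFS =====

-- the initials B collects from cs when the boundary flag starts as st
def pvBgo : List Char → Bool → List Char
  | [], _ => []
  | c :: rest, st =>
    if PySem.Chars.isspace c then pvBgo rest true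
    else (if st && PySem.Chars.isalnum c then [PySem.Chars.upperChar c] else []) ++ pvBgo rest false

-- contribution of one word to A's initials list
def pvFword (w : List Char) : List Char :=
  match w with
  | [] => []
  | c :: _ => if PySem.Chars.isalnum c then [c] else []

theorem pvAStep_eq (acc w : List Char) : pvAStep acc w = acc ++ pvFword w := by
  cases w with
  | nil => simp [pvAStep, pvFword]
  | cons c t => simp only [pvAStep, pvFword]; split <;> simp

theorem pvBfold (cs : List Char) (acc : List Char) (st : Bool) :
    (cs.foldl pvBStep (acc, st)).1 = acc ++ pvBgo cs st := by
  induction cs generalizing acc st with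
  | nil => simp [pvBgo]
  | cons c rest ih =>
    simp only [List.foldl_cons, pvBStep, pvBgo]
    split
    · simp [ih]
    · split <;> simp [ih]

theorem pvInits_append (ws : List (List Char)) (w : List Char) :
    ((ws ++ [w]).foldl pvAStep []) = ws.foldl pvAStep [] ++ pvFword w := by
  rw [List.foldl_append]
  simp [List.foldl_cons, pvAStep_eq]

theorem pvFword_append_left (xs ys : List Char) (h : xs ≠ []) :
    pvFword (xs ++ ys) = pvFword xs := by
  cases xs with
  | nil => exact absurd rfl h
  | cons c t => simp [pvFword]

theorem pvGo_main (cs cur : List Char) (acc : List (List Char)) :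
    List.map PySem.Chars.upperChar ((PySem.Chars.split₀.go cs cur acc).foldl pvAStep []) =
      List.map PySem.Chars.upperChar (acc.reverse.foldl pvAStep []) ++
      List.map PySem.Chars.upperChar (pvFword cur.reverse) ++ pvBgo cs cur.isEmpty := by
  induction cs generalizing cur acc with
  | nil =>
    by_cases h : cur = []
    · subst h; simp [PySem.Chars.split₀.go, pvFword, pvBgo]
    · rw [show PySem.Chars.split₀.go [] cur acc = (cur.reverse :: acc).reverse by
        simp [PySem.Chars.split₀.go, List.isEmpty_eq_false_iff.mpr h]]
      rw [List.reverse_cons, pvInits_append, List.map_append]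
      simp [pvBgo]
  | cons c rest ih =>
    by_cases hsp : PySem.Chars.isspace c = true
    · by_cases h : cur = []
      · subst h
        rw [show PySem.Chars.split₀.go (c :: rest) [] acc = PySem.Chars.split₀.go rest [] acc by
          simp [PySem.Chars.split₀.go, hsp]]
        rw [ih]
        simp [pvBgo, hsp, pvFword]
      · rw [show PySem.Chars.split₀.go (c :: rest) cur acc =
            PySem.Chars.split₀.go rest [] (cur.reverse :: acc) by
          simp [PySem.Chars.split₀.go, hsp, List.isEmpty_eq_false_iff.mpr h]]
        rw [ih]
        rw [List.reverse_cons, pvInits_append, List.map_append]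
        simp [pvBgo, hsp, pvFword]
    · rw [show PySem.Chars.split₀.go (c :: rest) cur acc =
          PySem.Chars.split₀.go rest (c :: cur) acc by
        simp [PySem.Chars.split₀.go, hsp]]
      rw [ih]
      by_cases h : cur = []
      · subst h
        simp only [List.reverse_cons, List.reverse_nil, List.nil_append]
        cases ha : PySem.Chars.isalnum c <;> simp [pvFword, pvBgo, hsp, ha]
      · have h' : cur.reverse ≠ [] := by simpa using h
        rw [List.reverse_cons, pvFword_append_left _ _ h']
        simp [pvBgo, hsp, List.isEmpty_eq_false_iff.mpr h]

theorem pvBgo_all_space (cs : List Char) (st : Bool)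
    (h : ∀ c ∈ cs, PySem.Chars.isspace c = true) : pvBgo cs st = [] := by
  induction cs generalizing st with
  | nil => rfl
  | cons c rest ih =>
    simp only [pvBgo, h c (by simp), if_pos]
    exact ih _ (fun x hx => h x (by simp [hx]))

theorem pvStrip_all_space (cs : List Char) (h : PySem.Chars.strip cs = []) :
    ∀ c ∈ cs, PySem.Chars.isspace c = true := by
  have hl : PySem.Chars.lstrip cs = [] := by
    by_contra hne
    have : PySem.Chars.rstrip (PySem.Chars.lstrip cs) = [] := h
    unfold PySem.Chars.rstrip at this
    have h2 : List.dropWhile PySem.Chars.isspace (PySem.Chars.lstrip cs).reverse = [] := by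
      simpa using this
    have hall : ∀ c ∈ (PySem.Chars.lstrip cs).reverse, PySem.Chars.isspace c = true :=
      List.dropWhile_eq_nil_iff.mp h2
    -- head of lstrip cs is not a space
    obtain ⟨hd, tl, heq⟩ := List.exists_cons_of_ne_nil hne
    have hhd : PySem.Chars.isspace hd = true := hall hd (by simp [heq])
    have : ¬ PySem.Chars.isspace hd = true := by
      have := List.head_dropWhile_not PySem.Chars.isspace (l := cs)
      unfold PySem.Chars.lstrip at heq
      simpa [heq] using this (by simp [heq])
    exact this hhd
  unfold PySem.Chars.lstrip at hl
  exact List.dropWhile_eq_nil_iff.mp hl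

theorem pv_eq_all (s : String) : generate_initials s = generate_initials_alt s := by
  unfold generate_initials generate_initials_alt
  have hB : (s.toList.foldl pvBStep (([] : List Char), true)).1 = pvBgo s.toList true := by
    simpa using pvBfold s.toList [] true
  by_cases hg : PySem.Str.strip s = ""
  · rw [if_pos hg]
    have hstrip : PySem.Chars.strip s.toList = [] := by
      have := congrArg String.toList hg
      simpa [PySem.Str.toList_strip] using this
    have hb0 : pvBgo s.toList true = [] :=
      pvBgo_all_space _ _ (pvStrip_all_space _ hstrip)
    simp only [hB, hb0]
    rfl
  · rw [if_neg hg]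
    have h2 := pvGo_main s.toList [] []
    simp only [List.reverse_nil, List.foldl_nil, List.map_nil, List.nil_append,
      pvFword, List.isEmpty_nil] at h2
    simp only [PySem.Chars.split₀, PySem.Chars.upper, hB]
    exact congrArg String.mk h2

-- ===== VERDICT (by name: the statement is the Claim_ definition above) =====
theorem generate_initials_spec : Claim_equal_generate_initials := by
  intro s _
  unfold Spec_generate_initials
  exact pv_eq_all s
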